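-- pv_equiv track=rewrite | github.com/GPCSantosh/ai-voice-detection | honeypot.py | analyze_scam_message
-- ===== SOURCE A (Python) =====
-- def analyze_scam_message(text: str):
--     scam_keywords = [
--         "blocked",
--         "suspended",
--         "urgent",
--         "verify",
--         "upi",
--         "bank",
--         "account",
--         "freeze",
--         "kyc"
--     ]
--
--     text_lower = text.lower()
--     scam_detected = any(word in text_lower for word in scam_keywords)
--
--     if scam_detected:
--         reply = "Why will my account be blocked?"
--     else:
--         reply = "Can you explain more?"
--
--     return scam_detected, reply
-- ===== SOURCE B (Python) =====
-- def analyze_scam_message(text: str):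
--     scam_keywords = [
--         "blocked",
--         "suspended",
--         "urgent",
--         "verify",
--         "upi",
--         "bank",
--         "account",
--         "freeze",
--         "kyc",
--     ]
--     text_lower = text.lower()
--     # single position-major pass: at each position, does any keyword start here?
--     scam_detected = any(
--         text_lower.startswith(word, i)
--         for i in range(len(text_lower))
--         for word in scam_keywords
--     )
--     reply = "Why will my account be blocked?" if scam_detected else "Can you explain more?"
--     return scam_detected, reply
-- ===== Notes on version B (the rewrite author's own statement) =====
-- stated objective: alternative
-- what changed: Replaces nine independent full-text substring scans (keyword-major) with one position-major pass over the lowercased text that tests at each position whether any keyword starts there.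
import Mathlib
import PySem

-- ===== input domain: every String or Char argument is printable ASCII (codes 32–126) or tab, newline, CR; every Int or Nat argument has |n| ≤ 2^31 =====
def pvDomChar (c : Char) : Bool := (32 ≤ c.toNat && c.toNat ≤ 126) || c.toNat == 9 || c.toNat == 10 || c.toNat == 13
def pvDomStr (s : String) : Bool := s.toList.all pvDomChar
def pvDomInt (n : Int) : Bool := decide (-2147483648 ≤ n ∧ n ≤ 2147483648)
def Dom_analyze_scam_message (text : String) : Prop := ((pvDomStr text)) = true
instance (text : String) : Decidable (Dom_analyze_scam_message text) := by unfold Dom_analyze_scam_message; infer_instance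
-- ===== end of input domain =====

-- B replaces A's nine keyword-major substring scans with one position-major pass
-- (at each position: does some keyword start here?); same results, objective: alternative.

-- ===== PORT A =====
def pvKeywords : List String :=
  ["blocked", "suspended", "urgent", "verify", "upi", "bank", "account", "freeze", "kyc"]

def analyze_scam_message (text : String) : Bool × String :=
  let text_lower := PySem.Str.lower text
  let scam_detected := pvKeywords.any (fun word => PySem.Str.isIn word text_lower)
  let reply := if scam_detected then "Why will my account be blocked?" else "Can you explain more?"
  (scam_detected, reply)

-- ===== PORT B =====
-- positions i of range(len(t)) correspond to the nonempty suffixes of t, scanned left to right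
def pvScanPos (kws : List String) : List Char → Bool
  | [] => false
  | c :: rest =>
      kws.any (fun word => PySem.Chars.startswith (c :: rest) word.toList) || pvScanPos kws rest

def analyze_scam_message_alt (text : String) : Bool × String :=
  let text_lower := PySem.Str.lower text
  let scam_detected := pvScanPos pvKeywords text_lower.toList
  let reply := if scam_detected then "Why will my account be blocked?" else "Can you explain more?"
  (scam_detected, reply)

-- ===== PRECONDITION & SPEC =====
def Spec_analyze_scam_message (text : String) (out : Bool × String) : Prop := out = analyze_scam_message_alt text
instance (text : String) (out : Bool × String) : Decidable (Spec_analyze_scam_message text out) := by unfold Spec_analyze_scam_message; infer_instance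

-- ===== CLAIM (what is proved, stated in full; the proofs are below) =====
def Claim_equal_analyze_scam_message : Prop := ∀ (text : String), Dom_analyze_scam_message text → Spec_analyze_scam_message text (analyze_scam_message text)

-- ===== LEMMAS AND PROOFS =====

theorem pvScanPos_iff (kws : List String) (hkw : ∀ w ∈ kws, w.toList ≠ []) :
    ∀ l : List Char, pvScanPos kws l = true ↔ ∃ w ∈ kws, ∃ j, w.toList <+: l.drop j := by
  intro l
  induction l with
  | nil =>
      simp only [pvScanPos, List.drop_nil]
      constructor
      · intro h; cases h
      · rintro ⟨w, hw, j, hp⟩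
        exact absurd (List.prefix_nil.mp hp) (hkw w hw)
  | cons c rest ih =>
      simp only [pvScanPos, Bool.or_eq_true, List.any_eq_true, PySem.Chars.startswith_iff, ih]
      constructor
      · rintro (⟨w, hw, hp⟩ | ⟨w, hw, j, hp⟩)
        · exact ⟨w, hw, 0, by simpa using hp⟩
        · exact ⟨w, hw, j + 1, by simpa using hp⟩
      · rintro ⟨w, hw, j, hp⟩
        cases j with
        | zero => exact Or.inl ⟨w, hw, by simpa using hp⟩
        | succ j' => exact Or.inr ⟨w, hw, j', by simpa using hp⟩

theorem pvDetect_eq (kws : List String) (hkw : ∀ w ∈ kws, w.toList ≠ []) (t : String) :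
    kws.any (fun word => PySem.Str.isIn word t) = pvScanPos kws t.toList := by
  have key : ∀ w : String, PySem.Str.isIn w t = true ↔ ∃ j, w.toList <+: t.toList.drop j := by
    intro w
    rw [PySem.Str.isIn_iff_infix, ← PySem.Chars.isIn_iff_infix,
        ← PySem.Chars.exists_prefix_drop_iff_isIn]
  rw [Bool.eq_iff_iff, List.any_eq_true, pvScanPos_iff kws hkw]
  constructor
  · rintro ⟨w, hw, hin⟩
    obtain ⟨j, hp⟩ := (key w).mp hin
    exact ⟨w, hw, j, hp⟩
  · rintro ⟨w, hw, j, hp⟩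
    exact ⟨w, hw, (key w).mpr ⟨j, hp⟩⟩

-- ===== VERDICT (by name: the statement is the Claim_ definition above) =====
theorem analyze_scam_message_spec : Claim_equal_analyze_scam_message := by
  intro text _
  unfold Spec_analyze_scam_message analyze_scam_message analyze_scam_message_alt
  have h := pvDetect_eq pvKeywords (by decide) (PySem.Str.lower text)
  simp only [h]
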